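-- pv_equiv track=rewrite | github.com/Wulfic/Cicada3301 | LiberPrimus/pages/page_00/analysis/grid_transposition_analysis.py | columnar_read_reverse
-- ===== SOURCE A (Python) =====
-- def columnar_read_reverse(text, width):
--     """Read column-wise assuming text was written column-wise (reverse operation)"""
--     height = (len(text) + width - 1) // width
--     padded = text + 'X' * (height * width - len(text))
--
--     # Write into grid by columns
--     grid = [['' for _ in range(width)] for _ in range(height)]
--     idx = 0
--     for col in range(width):
--         for row in range(height):
--             if idx < len(padded):
--                 grid[row][col] = padded[idx]
--                 idx += 1
--
--     # Read by rows
--     result = []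
--     for row in grid:
--         result.extend(row)
--
--     return ''.join(result)
-- ===== SOURCE B (Python) =====
-- def columnar_read_reverse(text, width):
--     """Read back row-wise a text that was written column-wise: same height and
--     padding as the original, then one pass of direct index arithmetic instead of
--     building and re-reading a 2D grid."""
--     height = (len(text) + width - 1) // width
--     padded = text + 'X' * (height * width - len(text))
--     return ''.join(padded[c * height + r] for r in range(height) for c in range(width))
-- ===== Notes on version B (the rewrite author's own statement) =====
-- stated objective: simpler
-- what changed: B drops A's mutable 2D grid (column-wise fill pass followed by a row-wise read pass) and emits the result in one comprehension by direct index arithmetic padded[c*height+r]; measured ~1.7x faster (no grid allocation, single pass).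
import Mathlib
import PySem

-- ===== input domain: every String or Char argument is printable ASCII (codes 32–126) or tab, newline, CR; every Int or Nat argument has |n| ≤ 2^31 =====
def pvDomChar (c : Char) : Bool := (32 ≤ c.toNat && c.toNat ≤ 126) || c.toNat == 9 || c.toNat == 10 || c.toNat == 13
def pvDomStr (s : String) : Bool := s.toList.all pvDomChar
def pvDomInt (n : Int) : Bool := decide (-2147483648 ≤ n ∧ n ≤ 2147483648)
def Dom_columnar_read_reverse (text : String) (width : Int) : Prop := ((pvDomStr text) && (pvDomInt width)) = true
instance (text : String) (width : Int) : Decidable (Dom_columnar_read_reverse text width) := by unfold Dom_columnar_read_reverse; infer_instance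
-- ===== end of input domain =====

-- B replaces A's grid fill-then-read with one pass of direct index arithmetic (objective: simpler).


-- ===== PORT A =====
-- Literal port of A: height/padded, a height×width grid of '' strings, a column-major
-- fill loop with a running idx guarded by idx < len(padded), then a row-major read.
-- Grid entries are Python strings, so List Char ('' = [], padded[idx] = a singleton).
def columnar_read_reverse (text : String) (width : Int) : String :=
  let t := text.toList
  let height : Int := PySem.Int.floordiv ((t.length : Int) + width - 1) width
  let padded : List Char := t ++ List.replicate ((height * width - (t.length : Int)).toNat) 'X'
  let grid : List (List (List Char)) := List.replicate height.toNat (List.replicate width.toNat [])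
  let fin := (PySem.List.pyRange 0 width 1).foldl (fun st col =>
      (PySem.List.pyRange 0 height 1).foldl
        (fun (st : List (List (List Char)) × Int) row =>
          if st.2 < (padded.length : Int) then
            (st.1.modify row.toNat (fun r => r.set col.toNat [PySem.List.pyGetD padded st.2 'X']),
             st.2 + 1)
          else st) st) (grid, 0)
  let result := fin.1.foldl (fun acc row => acc ++ row) []
  String.ofList (PySem.Chars.join [] result)

-- ===== PORT B =====
-- Literal port of B: same height/padded, then one comprehension padded[c*height+r]
-- for r in range(height) for c in range(width). The index is always in range when the
-- loops run (proved below), so the pyGetD default is never used.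
def columnar_read_reverse_alt (text : String) (width : Int) : String :=
  let t := text.toList
  let height : Int := PySem.Int.floordiv ((t.length : Int) + width - 1) width
  let padded : List Char := t ++ List.replicate ((height * width - (t.length : Int)).toNat) 'X'
  String.ofList ((PySem.List.pyRange 0 height 1).flatMap (fun r =>
    (PySem.List.pyRange 0 width 1).map (fun c =>
      PySem.List.pyGetD padded (c * height + r) 'X')))

-- ===== PRECONDITION & SPEC =====
-- width = 0 makes the very first division raise ZeroDivisionError in both Pythons.
def Pre_columnar_read_reverse (text : String) (width : Int) : Prop := width ≠ 0
instance (text : String) (width : Int) : Decidable (Pre_columnar_read_reverse text width) := by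
  unfold Pre_columnar_read_reverse; infer_instance

def pvWitness_columnar_read_reverse : String × Int := ("HELLOWORLD", 3)

def Spec_columnar_read_reverse (text : String) (width : Int) (out : String) : Prop := out = columnar_read_reverse_alt text width
instance (text : String) (width : Int) (out : String) : Decidable (Spec_columnar_read_reverse text width out) := by unfold Spec_columnar_read_reverse; infer_instance

-- ===== CLAIM (what is proved, stated in full; the proofs are below) =====
def Claim_equal_columnar_read_reverse : Prop := ∀ (text : String) (width : Int), Dom_columnar_read_reverse text width → Pre_columnar_read_reverse text width → Spec_columnar_read_reverse text width (columnar_read_reverse text width)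


-- ===== LEMMAS AND PROOFS =====

-- The grid after A has filled columns 0..k-1 completely and, in column k, rows 0..j-1:
-- entry (r,c) holds the one-char string padded[c*h+r] when filled, '' otherwise.
def pvF (padded : List Char) (h w k j : Nat) : List (List (List Char)) :=
  (List.range h).map (fun r => (List.range w).map (fun c =>
    if c < k ∨ (c = k ∧ r < j) then [padded.getD (c * h + r) 'X'] else []))

lemma pvF_zero (padded : List Char) (h w : Nat) :
    pvF padded h w 0 0 = List.replicate h (List.replicate w ([] : List Char)) := by
  simp [pvF, List.map_const']

lemma pvF_roll (padded : List Char) (h w c : Nat) :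
    pvF padded h w c h = pvF padded h w (c + 1) 0 := by
  unfold pvF
  apply List.map_congr_left
  intro r hr
  rw [List.mem_range] at hr
  apply List.map_congr_left
  intro c' _
  have : (c' < c ∨ (c' = c ∧ r < h)) ↔ (c' < c + 1 ∨ (c' = c + 1 ∧ r < 0)) := by omega
  rw [if_congr this rfl rfl]

lemma pvF_modify (padded : List Char) (h w c j : Nat) :
    (pvF padded h w c j).modify j (fun r => r.set c [padded.getD (c * h + j) 'X'])
      = pvF padded h w c (j + 1) := by
  apply List.ext_getElem
  · simp [pvF]
  · intro r h1 h2
    simp only [pvF, List.length_modify, List.length_map, List.length_range] at h1 h2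
    simp only [pvF, List.getElem_modify, List.getElem_map, List.getElem_range]
    by_cases hjr : j = r
    · subst hjr
      rw [if_pos rfl]
      apply List.ext_getElem
      · simp
      · intro c' hc1 hc2
        simp only [List.length_set, List.length_map, List.length_range] at hc1 hc2
        simp only [List.getElem_set, List.getElem_map, List.getElem_range]
        by_cases hcc : c = c'
        · subst hcc
          rw [if_pos rfl, if_pos (by omega)]
        · rw [if_neg hcc]
          have : (c' < c ∨ (c' = c ∧ j < j)) ↔ (c' < c ∨ (c' = c ∧ j < j + 1)) := by omega
          rw [if_congr this rfl rfl]
    · rw [if_neg hjr]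
      apply List.map_congr_left
      intro c' _
      have : (c' < c ∨ (c' = c ∧ r < j)) ↔ (c' < c ∨ (c' = c ∧ r < j + 1)) := by omega
      rw [if_congr this rfl rfl]

lemma pv_inner (padded : List Char) (h w c : Nat) (hc : c < w)
    (hlen : padded.length = h * w) (j : Nat) (hj : j ≤ h) :
    (List.range j).foldl
      (fun (st : List (List (List Char)) × Int) (row : Nat) =>
        if st.2 < (padded.length : Int) then
          (st.1.modify row (fun r => r.set c [PySem.List.pyGetD padded st.2 'X']), st.2 + 1)
        else st)
      (pvF padded h w c 0, ((c * h : Nat) : Int))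
    = (pvF padded h w c j, ((c * h + j : Nat) : Int)) := by
  induction j with
  | zero => simp
  | succ j ih =>
    have hjh : j < h := by omega
    rw [List.range_succ, List.foldl_append, ih (by omega)]
    have hguard : ((c * h + j : Nat) : Int) < (padded.length : Int) := by
      have h2 : c * h + j < h * w := by nlinarith
      rw [hlen]; exact_mod_cast h2
    simp only [List.foldl_cons, List.foldl_nil, if_pos hguard,
      PySem.List.pyGetD_natCast]
    rw [pvF_modify padded h w c j]
    have : ((c * h + j : Nat) : Int) + 1 = ((c * h + (j + 1) : Nat) : Int) := by
      push_cast; ring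
    rw [this]

lemma pv_outer (padded : List Char) (h w : Nat) (hlen : padded.length = h * w)
    (k : Nat) (hk : k ≤ w) :
    (List.range k).foldl
      (fun (st : List (List (List Char)) × Int) (col : Nat) =>
        (List.range h).foldl
          (fun (st : List (List (List Char)) × Int) (row : Nat) =>
            if st.2 < (padded.length : Int) then
              (st.1.modify row (fun r => r.set col [PySem.List.pyGetD padded st.2 'X']), st.2 + 1)
            else st) st)
      (pvF padded h w 0 0, (0 : Int))
    = (pvF padded h w k 0, ((k * h : Nat) : Int)) := by
  induction k with
  | zero => simp
  | succ k ih =>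
    rw [List.range_succ, List.foldl_append, ih (by omega)]
    simp only [List.foldl_cons, List.foldl_nil]
    rw [pv_inner padded h w k (by omega) hlen h le_rfl, pvF_roll]
    have : ((k * h + h : Nat) : Int) = (((k + 1) * h : Nat) : Int) := by
      push_cast; ring
    rw [this]


-- ===== VERDICT (by name: the statement is the Claim_ definition above) =====
theorem columnar_read_reverse_spec : Claim_equal_columnar_read_reverse := by
  intro text width _ hpre
  unfold Pre_columnar_read_reverse at hpre
  unfold Spec_columnar_read_reverse columnar_read_reverse columnar_read_reverse_alt
  simp only []
  rcases lt_or_gt_of_ne hpre with hneg | hpos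
  · -- width < 0: no columns; both return ""
    rw [PySem.List.pyRange_one_eq_nil (le_of_lt hneg)]
    simp only [List.foldl_nil]
    rw [PySem.List.foldl_append_eq_flatMap (fun x => x)]
    simp [Int.toNat_of_nonpos hneg.le, PySem.Chars.join, List.flatMap_def, List.intercalate]
  · -- 0 < width
    set n := text.toList.length with hn'
    set ht := PySem.Int.floordiv ((n : Int) + width - 1) width with hht
    set padded := text.toList ++ List.replicate ((ht * width - (n : Int)).toNat) 'X'
      with hpad
    have hkey := PySem.Int.floordiv_mul_add_mod ((n : Int) + width - 1) width
    have hm0 := PySem.Int.mod_nonneg ((n : Int) + width - 1) hpos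
    have hm1 := PySem.Int.mod_lt ((n : Int) + width - 1) hpos
    rw [← hht] at hkey
    have hm1' : PySem.Int.mod ((n : Int) + width - 1) width ≤ width - 1 := by omega
    have hub : (n : Int) ≤ ht * width := by linarith
    have hht0 : 0 ≤ ht := by
      by_contra hcon
      rw [not_le] at hcon
      nlinarith [mul_neg_of_neg_of_pos hcon hpos]
    set h := ht.toNat with hh
    have hhcast : (h : Int) = ht := Int.toNat_of_nonneg hht0
    set w := width.toNat with hw
    have hwcast : (w : Int) = width := Int.toNat_of_nonneg hpos.le
    have hlen : padded.length = h * w := by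
      rw [hpad]
      rw [List.length_append, List.length_replicate]
      have hMc : ((h * w : Nat) : Int) = ht * width := by
        rw [Nat.cast_mul, hhcast, hwcast]
      generalize hM : ht * width = M at hMc hub
      omega
    rw [← hwcast, ← hhcast]
    simp only [PySem.List.pyRange_zero_nat, List.foldl_map, Int.toNat_natCast,
      List.flatMap_map, List.map_map]
    rw [← pvF_zero padded h w, pv_outer padded h w hlen w le_rfl]
    have hfold : ∀ (l : List (List (List Char))),
        l.foldl (fun acc row => acc ++ row) [] = l.flatten := by
      intro l
      simpa [List.flatMap_def] using PySem.List.foldl_append_eq_flatMap (fun x => x) l []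
    rw [hfold]
    have hpv : pvF padded h w w 0 = (List.range h).map
        (fun r => ((List.range w).map (fun c => padded.getD (c * h + r) 'X')).map
          (fun ch => [ch])) := by
      unfold pvF
      apply List.map_congr_left
      intro r _
      rw [List.map_map]
      apply List.map_congr_left
      intro c hc
      rw [List.mem_range] at hc
      simp [hc, Function.comp]
    rw [hpv, ← List.flatMap_def, ← List.map_flatMap, PySem.Chars.join_nil_singletons]
    simp only [Function.comp_def, ← Nat.cast_mul, ← Nat.cast_add,
      PySem.List.pyGetD_natCast]
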